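-- pv_equiv track=rewrite | github.com/mitmproxy/mitmproxy | mitmproxy/utils/strutils.py | cut_after_n_lines
-- ===== SOURCE A (Python) =====
-- def cut_after_n_lines(content: str, n: int) -> str:
--     assert n > 0
--     pos = content.find("\n")
--     while pos >= 0 and n > 1:
--         pos = content.find("\n", pos + 1)
--         n -= 1
--     if pos >= 0:
--         content = content[: pos + 1]
--     return content
-- ===== SOURCE B (Python) =====
-- def cut_after_n_lines(content: str, n: int) -> str:
--     assert n > 0
--     out = []
--     for ch in content:
--         out.append(ch)
--         if ch == "\n":
--             n -= 1
--             if n == 0: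
--                 return "".join(out)
--     return content
-- ===== Notes on version B (the rewrite author's own statement) =====
-- stated objective: alternative
-- what changed: Replaces the find()-position-scanning-plus-slice strategy with a single forward character pass that accumulates output and returns as soon as the n-th newline is appended.
import Mathlib
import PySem

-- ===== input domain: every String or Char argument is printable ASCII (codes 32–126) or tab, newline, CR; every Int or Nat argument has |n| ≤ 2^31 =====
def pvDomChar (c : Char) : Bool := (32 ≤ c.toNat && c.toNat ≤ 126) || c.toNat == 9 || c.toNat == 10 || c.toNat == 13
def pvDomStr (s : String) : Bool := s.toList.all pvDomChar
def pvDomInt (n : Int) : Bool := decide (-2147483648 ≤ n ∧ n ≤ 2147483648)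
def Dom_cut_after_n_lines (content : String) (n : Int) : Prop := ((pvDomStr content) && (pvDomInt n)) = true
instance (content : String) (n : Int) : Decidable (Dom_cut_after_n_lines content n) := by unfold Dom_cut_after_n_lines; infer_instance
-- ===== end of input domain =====

-- B replaces A's find()-position-scanning-plus-slice strategy with a single forward
-- character pass that emits output until the n-th newline (objective: alternative).

-- ===== PORT A =====
-- the while loop: 'while pos >= 0 and n > 1: pos = content.find("\n", pos + 1); n -= 1'
def cutLoop (content : String) (pos : Int) (n : Int) : Int :=
  if pos ≥ 0 ∧ n > 1 then
    cutLoop content (PySem.Str.findFrom content "\n" (pos + 1)) (n - 1)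
  else pos
termination_by (n - 1).toNat
decreasing_by omega

def cut_after_n_lines (content : String) (n : Int) : String :=
  -- 'assert n > 0' raises AssertionError for n ≤ 0: excluded by Pre_
  let pos := PySem.Str.find content "\n"
  let pos := cutLoop content pos n
  if pos ≥ 0 then PySem.Str.slice content none (some (pos + 1)) else content

-- ===== PORT B =====
-- the for loop over the characters, with 'out' the accumulated list; 'some r' = early
-- 'return "".join(out)' (exact: join of singleton-char strings is the char list itself)
def cutAltGo (cs : List Char) (n : Int) (out : List Char) : Option (List Char) :=
  match cs with
  | [] => none
  | c :: rest =>
    if c = '\n' then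
      if n - 1 = 0 then some (out ++ [c]) else cutAltGo rest (n - 1) (out ++ [c])
    else cutAltGo rest n (out ++ [c])

def cut_after_n_lines_alt (content : String) (n : Int) : String :=
  match cutAltGo content.toList n [] with
  | some out => String.ofList out
  | none => content

-- ===== PRECONDITION & SPEC =====
-- A's 'assert n > 0' raises AssertionError for n ≤ 0; those inputs are excluded.
def Pre_cut_after_n_lines (content : String) (n : Int) : Prop := 0 < n
instance (content : String) (n : Int) : Decidable (Pre_cut_after_n_lines content n) := by
  unfold Pre_cut_after_n_lines; infer_instance

def pvWitness_cut_after_n_lines : String × Int := ("one\ntwo\nthree\n", 2)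

def Spec_cut_after_n_lines (content : String) (n : Int) (out : String) : Prop := out = cut_after_n_lines_alt content n
instance (content : String) (n : Int) (out : String) : Decidable (Spec_cut_after_n_lines content n out) := by unfold Spec_cut_after_n_lines; infer_instance

-- ===== CLAIM (what is proved, stated in full; the proofs are below) =====
def Claim_equal_cut_after_n_lines : Prop := ∀ (content : String) (n : Int), Dom_cut_after_n_lines content n → Pre_cut_after_n_lines content n → Spec_cut_after_n_lines content n (cut_after_n_lines content n)

-- ===== LEMMAS AND PROOFS =====

/-- index (0-based position) of the (k+1)-th newline of `cs`, if it exists. -/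
def nthNl : List Char → Nat → Option Nat
  | [], _ => none
  | c :: cs, k =>
    if c = '\n' then
      match k with
      | 0 => some 0
      | k + 1 => (nthNl cs k).map (· + 1)
    else (nthNl cs k).map (· + 1)

/-- A's integer encoding of an optional position: -1 for "absent". -/
def optInt : Option Nat → Int
  | some p => (p : Int)
  | none => -1

theorem singleton_prefix_iff (a : Char) (l : List Char) : [a] <+: l ↔ l.head? = some a := by
  cases l with
  | nil => simp
  | cons b t => simp [List.cons_prefix_cons, eq_comm]

theorem nthNl_none_of_not_mem (cs : List Char) (k : Nat) (h : '\n' ∉ cs) :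
    nthNl cs k = none := by
  induction cs generalizing k with
  | nil => simp [nthNl]
  | cons c rest ih =>
    have hc : ¬ c = '\n' := by intro hc; exact h (by simp [hc])
    have hr : '\n' ∉ rest := fun hm => h (by simp [hm])
    simp [nthNl, hc, ih _ hr]

theorem nthNl_none_mono (cs : List Char) (k j : Nat) (h : nthNl cs k = none) :
    nthNl cs (k + j) = none := by
  induction cs generalizing k with
  | nil => simp [nthNl]
  | cons c rest ih =>
    by_cases hc : c = '\n'
    · cases k with
      | zero => simp [nthNl, hc] at h
      | succ k =>
        have h' : nthNl rest k = none := by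
          simpa [nthNl, hc, Option.map_eq_none_iff] using h
        have hkj : k + 1 + j = (k + j) + 1 := by omega
        rw [hkj]
        simp [nthNl, hc, ih _ h']
    · have h' : nthNl rest k = none := by
        simpa [nthNl, hc, Option.map_eq_none_iff] using h
      simp [nthNl, hc, ih _ h']

theorem nthNl_lt_length (cs : List Char) (k p : Nat) (h : nthNl cs k = some p) :
    p < cs.length := by
  induction cs generalizing k p with
  | nil => simp [nthNl] at h
  | cons c rest ih =>
    by_cases hc : c = '\n'
    · cases k with
      | zero =>
        have : p = 0 := by simpa [nthNl, hc] using h.symm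
        simp [this]
      | succ k =>
        simp only [nthNl, hc] at h
        obtain ⟨q, hq, hpq⟩ := Option.map_eq_some_iff.mp (by simpa using h)
        have := ih _ _ hq
        simp; omega
    · simp only [nthNl, hc] at h
      obtain ⟨q, hq, hpq⟩ := Option.map_eq_some_iff.mp (by simpa using h)
      have := ih _ _ hq
      simp; omega

theorem nthNl_zero_of_first (cs : List Char) (p : Nat)
    (hp : ['\n'] <+: cs.drop p) (hmin : ∀ i < p, ¬ ['\n'] <+: cs.drop i) :
    nthNl cs 0 = some p := by
  induction cs generalizing p with
  | nil => simp at hp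
  | cons c rest ih =>
    by_cases hc : c = '\n'
    · have hp0 : p = 0 := by
        by_contra hne
        exact hmin 0 (by omega) (by simp [hc, singleton_prefix_iff])
      simp [nthNl, hc, hp0]
    · have hpne : p ≠ 0 := by
        intro h0
        rw [h0] at hp
        rw [singleton_prefix_iff] at hp
        simp at hp
        exact hc hp
      obtain ⟨q, rfl⟩ : ∃ q, p = q + 1 := ⟨p - 1, by omega⟩
      have hp' : ['\n'] <+: rest.drop q := by simpa using hp
      have hmin' : ∀ i < q, ¬ ['\n'] <+: rest.drop i := by
        intro i hi hpre
        exact hmin (i + 1) (by omega) (by simpa using hpre)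
      simp [nthNl, hc, ih _ hp' hmin']

theorem find_eq_nthNl (cs : List Char) :
    PySem.Chars.find cs ['\n'] = optInt (nthNl cs 0) := by
  by_cases hin : ['\n'] <:+: cs
  · have hnn : 0 ≤ PySem.Chars.find cs ['\n'] :=
      (PySem.Chars.find_nonneg_iff cs ['\n']).mpr hin
    obtain ⟨hpre, hmin⟩ := PySem.Chars.find_spec hnn
    rw [nthNl_zero_of_first cs _ hpre hmin]
    simp [optInt, Int.toNat_of_nonneg hnn]
  · have hmem : '\n' ∉ cs := by
      intro hmem
      obtain ⟨s, t, rfl⟩ := List.append_of_mem hmem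
      exact hin ⟨s, t, by simp⟩
    rw [nthNl_none_of_not_mem cs 0 hmem]
    simpa [optInt] using (PySem.Chars.find_eq_neg_one_iff cs ['\n']).mpr hin

theorem nthNl_succ (cs : List Char) (k p : Nat) (h : nthNl cs k = some p) :
    nthNl cs (k + 1) = (nthNl (cs.drop (p + 1)) 0).map (fun q => p + 1 + q) := by
  induction cs generalizing k p with
  | nil => simp [nthNl] at h
  | cons c rest ih =>
    by_cases hc : c = '\n'
    · cases k with
      | zero =>
        have hp0 : p = 0 := by simpa [nthNl, hc] using h.symm
        subst hp0
        simp only [nthNl, hc, List.drop_succ_cons, List.drop_zero]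
        cases nthNl rest 0 <;> simp [Nat.add_comm]
      | succ k =>
        simp only [nthNl, hc] at h
        obtain ⟨q, hq, hpq⟩ := Option.map_eq_some_iff.mp (by simpa using h)
        subst hpq
        have := ih _ _ hq
        simp only [nthNl, hc, if_pos rfl, this, List.drop_succ_cons]
        cases nthNl (rest.drop (q + 1)) 0 <;> simp <;> omega
    · simp only [nthNl, hc] at h
      obtain ⟨q, hq, hpq⟩ := Option.map_eq_some_iff.mp (by simpa using h)
      subst hpq
      have := ih _ _ hq
      simp only [nthNl, hc, if_neg hc, this, List.drop_succ_cons]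
      cases nthNl (rest.drop (q + 1)) 0 <;> simp <;> omega

theorem cutLoop_eq_aux (content : String) (m : Nat) :
    ∀ k, cutLoop content (optInt (nthNl content.toList k)) ((m : Int) + 1)
      = optInt (nthNl content.toList (k + m)) := by
  induction m with
  | zero =>
    intro k
    rw [cutLoop]
    simp
  | succ m ih =>
    intro k
    cases h : nthNl content.toList k with
    | none =>
      rw [cutLoop]
      have : nthNl content.toList (k + (m + 1)) = none := nthNl_none_mono _ _ _ h
      simp [optInt, this]
    | some p =>
      have hlen : p + 1 ≤ content.toList.length := nthNl_lt_length _ _ _ h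
      have hstep : PySem.Str.findFrom content "\n" ((p : Int) + 1)
          = optInt (nthNl content.toList (k + 1)) := by
        rw [PySem.Str.findFrom_eq]
        have hnl : ("\n" : String).toList = ['\n'] := rfl
        rw [hnl]
        have hcast : ((p : Int) + 1) = ((p + 1 : Nat) : Int) := by push_cast; ring
        rw [hcast, PySem.Chars.findFrom_natCast _ _ _ hlen]
        rw [find_eq_nthNl]
        rw [nthNl_succ _ _ _ h]
        cases nthNl (content.toList.drop (p + 1)) 0 with
        | none => simp [optInt]
        | some q =>
          simp only [Option.map_some, optInt]
          rw [if_neg (by omega)]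
          push_cast; ring
      rw [cutLoop]
      rw [if_pos (by constructor <;> simp [optInt, h] <;> omega)]
      simp only [optInt, h]
      rw [hstep]
      have harith : (((m + 1 : Nat) : Int) + 1 - 1) = (m : Int) + 1 := by push_cast; ring
      rw [harith, ih (k + 1), show k + 1 + m = k + (m + 1) from by omega]
      cases nthNl content.toList (k + (m + 1)) <;> rfl

theorem cutLoop_eq (content : String) (n : Int) (k : Nat) (h1 : 1 ≤ n) :
    cutLoop content (optInt (nthNl content.toList k)) n
      = optInt (nthNl content.toList (k + (n - 1).toNat)) := by
  have h := cutLoop_eq_aux content (n - 1).toNat k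
  rwa [show ((n - 1).toNat : Int) + 1 = n by omega] at h

theorem cutAltGo_eq (cs : List Char) (n : Int) (out : List Char) (h1 : 1 ≤ n) :
    cutAltGo cs n out
      = match nthNl cs (n - 1).toNat with
        | some p => some (out ++ cs.take (p + 1))
        | none => none := by
  induction cs generalizing n out with
  | nil => simp [cutAltGo, nthNl]
  | cons c rest ih =>
    by_cases hc : c = '\n'
    · by_cases h1' : n = 1
      · subst h1'
        simp [cutAltGo, hc, nthNl]
      · subst hc
        have h2 : 2 ≤ n := by omega
        have hm : (n - 1).toNat = (n - 2).toNat + 1 := by omega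
        rw [cutAltGo, if_pos rfl, if_neg (by omega : ¬ n - 1 = 0)]
        rw [ih (n - 1) (out ++ ['\n']) (by omega)]
        rw [hm]
        simp only [nthNl, if_pos rfl]
        have : (n - 1 - 1).toNat = (n - 2).toNat := by omega
        rw [this]
        cases nthNl rest (n - 2).toNat with
        | none => simp
        | some q => simp
    · rw [cutAltGo, if_neg hc]
      rw [ih n (out ++ [c]) h1]
      simp only [nthNl, hc]
      cases nthNl rest (n - 1).toNat with
      | none => simp
      | some q => simp

-- ===== VERDICT (by name: the statement is the Claim_ definition above) =====
theorem cut_after_n_lines_spec : Claim_equal_cut_after_n_lines := by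
  intro content n _ hpre
  have h1 : 1 ≤ n := hpre
  unfold Spec_cut_after_n_lines cut_after_n_lines cut_after_n_lines_alt
  have hfind : PySem.Str.find content "\n" = optInt (nthNl content.toList 0) := by
    have : PySem.Str.find content "\n" = PySem.Chars.find content.toList ['\n'] := rfl
    rw [this, find_eq_nthNl]
  simp only []
  rw [hfind, cutLoop_eq content n 0 h1, cutAltGo_eq content.toList n [] h1]
  simp only [Nat.zero_add]
  cases h : nthNl content.toList (n - 1).toNat with
  | none => simp [optInt]
  | some p =>
    simp only [optInt]
    rw [if_pos (by positivity)]
    rw [show PySem.Str.slice content none (some ((p : Int) + 1))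
        = String.ofList (PySem.Chars.slice content.toList none (some ((p : Int) + 1))) from rfl]
    rw [PySem.Chars.slice_eq_listSlice]
    have hcast : ((p : Int) + 1) = ((p + 1 : Nat) : Int) := by push_cast; ring
    rw [hcast, PySem.List.slice_to _ (by positivity)]
    simp
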